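-- pv_equiv track=rewrite | github.com/67776f6e30/python_algorithm | 프로그래머스/2021 블라인드/7.py | solution
-- ===== SOURCE A (Python) =====
-- from collections import defaultdict, deque
-- import heapq
--
-- def solution(sales, links):
--     result = 0
--     graph = defaultdict(list)
--     cost = defaultdict(list)
--     for index, dest in links:
--         graph[index].append(dest)
--
--     for c in range(len(sales)):
--         cost[c+1] = sales[c]
--
--     q = deque([1])
--     visit = [1]
--     prev = 0
--     while q:
--         heap = []
--         node = q.popleft()
--         heapq.heappush(heap, (cost[node], node))
--         for n in graph[node]:
--             q.append(n)
--             heapq.heappush(heap, (cost[n], n))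
--             visit.append(n)
--         while heap:
--             c, i = heapq.heappop(heap)
--             if graph[i]:
--                 prev = i
--                 result += c
--                 break
--
--     return result
-- ===== SOURCE B (Python) =====
-- from collections import defaultdict, deque
--
-- def solution(sales, links):
--     children = defaultdict(list)
--     for a, b in links:
--         children[a].append(b)
--
--     # phase 1: BFS visit order from node 1
--     order = []
--     q = deque([1])
--     while q:
--         v = q.popleft()
--         order.append(v)
--         q.extend(children[v])
--
--     # phase 2: every visited node contributes the cheapest sale among
--     # itself and its children, restricted to nodes that themselves have children
--     def contrib(v):
--         costs = [sales[u - 1] for u in [v] + children[v] if children[u]]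
--         return min(costs) if costs else 0
--
--     return sum(contrib(v) for v in order)
-- ===== Notes on version B (the rewrite author's own statement) =====
-- stated objective: simpler
-- what changed: A's fused BFS loop with a per-node heapq push/pop-until-internal search is replaced by a two-phase decomposition: compute the plain BFS visit order first, then sum per-node contributions, each a direct min over the candidate sale costs whose node has children (no heap, no cost dict).
import Mathlib
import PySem

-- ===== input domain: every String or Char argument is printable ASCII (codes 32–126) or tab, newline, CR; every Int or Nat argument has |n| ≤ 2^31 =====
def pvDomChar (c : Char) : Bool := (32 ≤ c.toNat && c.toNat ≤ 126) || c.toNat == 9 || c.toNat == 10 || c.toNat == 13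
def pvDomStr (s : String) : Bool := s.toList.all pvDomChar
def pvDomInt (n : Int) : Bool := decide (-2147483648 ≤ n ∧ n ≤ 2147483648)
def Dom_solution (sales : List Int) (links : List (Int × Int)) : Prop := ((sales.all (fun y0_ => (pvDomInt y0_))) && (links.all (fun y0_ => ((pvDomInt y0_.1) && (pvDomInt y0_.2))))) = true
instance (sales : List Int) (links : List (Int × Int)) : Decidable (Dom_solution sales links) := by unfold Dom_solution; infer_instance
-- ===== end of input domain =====

-- B replaces A's per-node heap + pop-until-internal with a two-phase decomposition
-- (BFS order first, then a sum of per-node min contributions); objective: simpler.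

-- ===== PORT A =====
-- shared helper: both Pythons build the identical children adjacency defaultdict from links
-- ('for index, dest in links: graph[index].append(dest)')
def buildGraph (links : List (Int × Int)) : PySem.Dict Int (List Int) :=
  links.foldl (fun d p => d.modify p.1 [] (· ++ [p.2])) PySem.Dict.empty

-- 'for c in range(len(sales)): cost[c+1] = sales[c]'
def buildCost (sales : List Int) : PySem.Dict Int Int :=
  (PySem.List.pyRange 0 (sales.length : Int) 1).foldl
    (fun d c => d.insert (c + 1) (PySem.List.pyGetD sales c 0)) PySem.Dict.empty

-- heapq on int pairs: the heap list is kept sorted by Python's tuple order;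
-- heappush = ordered insert, heappop = take the head.
def heapPush (x : Int × Int) : List (Int × Int) → List (Int × Int)
  | [] => [x]
  | y :: ys =>
    if x.1 < y.1 ∨ (x.1 = y.1 ∧ x.2 ≤ y.2) then x :: y :: ys else y :: heapPush x ys

-- 'while heap: c, i = heappop(heap); if graph[i]: result += c; break'
def popUntil (g : PySem.Dict Int (List Int)) : List (Int × Int) → Option Int
  | [] => none
  | (c, i) :: rest => if g.getD i [] ≠ [] then some c else popUntil g rest

-- the BFS while-loop; 'cost' is defaultdict(list) in Python: a never-assigned key yields [],
-- and inside Pre_solution such a value is never compared nor added, so the port defaults to 0 there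
def aLoop (g : PySem.Dict Int (List Int)) (cost : PySem.Dict Int Int) :
    Nat → List Int → Int → Int
  | 0, _, result => result
  | _ + 1, [], result => result
  | fuel + 1, node :: q, result =>
    let ch := g.getD node []
    let heap := ch.foldl (fun h n => heapPush (cost.getD n 0, n) h)
      (heapPush (cost.getD node 0, node) [])
    match popUntil g heap with
    | some c => aLoop g cost fuel (q ++ ch) (result + c)
    | none => aLoop g cost fuel (q ++ ch) result

-- fuel for the while loop: inside Pre_solution the reachable subgraph is acyclic, so every
-- enqueued node corresponds to a duplicate-free walk from node 1, of which there are fewer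
-- than (L+1)^(L+1); the bound is never reached on admitted inputs
def pvFuel (links : List (Int × Int)) : Nat :=
  (links.length + 1) ^ (links.length + 1)

def solution (sales : List Int) (links : List (Int × Int)) : Int :=
  aLoop (buildGraph links) (buildCost sales) (pvFuel links) [1] 0

-- ===== PORT B =====
-- phase 1 of Source B: the plain BFS visit order from node 1 (same fuel convention as A's loop)
def bfsOrder (g : PySem.Dict Int (List Int)) : Nat → List Int → List Int
  | 0, _ => []
  | _ + 1, [] => []
  | fuel + 1, v :: q => v :: bfsOrder g fuel (q ++ g.getD v [])

-- phase 2 of Source B: 'min(costs) if costs else 0'; inside Pre_solution every u passing the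
-- guard satisfies 1 ≤ u ≤ len(sales), so sales[u-1] is in range and the default 0 unused
def contribB (sales : List Int) (g : PySem.Dict Int (List Int)) (v : Int) : Int :=
  let costs := ([v] ++ g.getD v []).filterMap
    (fun u => if g.getD u [] ≠ [] then some (PySem.List.pyGetD sales (u - 1) 0) else none)
  match costs with
  | [] => 0
  | c :: cs => cs.foldl min c

def solution_alt (sales : List Int) (links : List (Int × Int)) : Int :=
  let g := buildGraph links
  ((bfsOrder g (pvFuel links) [1]).map (contribB sales g)).sum

-- ===== PRECONDITION & SPEC =====
-- the set of nodes reachable from node 1 along links (iterated closure; it is a fixpoint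
-- after links.length rounds, see reach_closed below)
def reachStep (links : List (Int × Int)) (R : List Int) : List Int :=
  (R ++ R.flatMap (fun v => (links.filter (fun p => p.1 == v)).map (·.2))).dedup

def reachSet (links : List (Int × Int)) : List Int :=
  (fun R => reachStep links R)^[links.length] [1]

-- the strict descendants of v: the closure iterated from v's children
def descSet (links : List (Int × Int)) (v : Int) : List Int :=
  (fun R => reachStep links R)^[links.length]
    ((links.filter (fun p => p.1 == v)).map (·.2))

-- Pre_solution excludes exactly the inputs on which A does not return a value: a link
-- reachable from node 1 with an endpoint outside 1..len(sales) makes A's heap compare the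
-- cost-defaultdict's [] with an int or add [] to result (TypeError), and a cycle reachable
-- from node 1 makes A's BFS queue never empty (it diverges, as does B); links that node 1
-- never reaches are unconstrained, and duplicated children are admitted.
def Pre_solution (sales : List Int) (links : List (Int × Int)) : Prop :=
  (∀ p ∈ links, p.1 ∈ reachSet links →
      1 ≤ p.1 ∧ p.1 ≤ (sales.length : Int) ∧
      1 ≤ p.2 ∧ p.2 ≤ (sales.length : Int)) ∧
  (∀ v ∈ reachSet links, v ∉ descSet links v)

instance (sales : List Int) (links : List (Int × Int)) : Decidable (Pre_solution sales links) := by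
  unfold Pre_solution; infer_instance

def pvWitness_solution : List Int × (List (Int × Int)) := ([5, 4, 3], [(1, 2), (1, 3)])

def Spec_solution (sales : List Int) (links : List (Int × Int)) (out : Int) : Prop :=
  out = solution_alt sales links
instance (sales : List Int) (links : List (Int × Int)) (out : Int) : Decidable (Spec_solution sales links out) := by unfold Spec_solution; infer_instance

-- ===== CLAIM (what is proved, stated in full; the proofs are below) =====
def Claim_equal_solution : Prop := ∀ (sales : List Int) (links : List (Int × Int)), Dom_solution sales links → Pre_solution sales links → Spec_solution sales links (solution sales links)

-- ===== LEMMAS AND PROOFS =====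

-- the Python tuple order on int pairs
def pairLe (a b : Int × Int) : Prop := a.1 < b.1 ∨ (a.1 = b.1 ∧ a.2 ≤ b.2)

theorem pairLe_trans {a b c : Int × Int} (h1 : pairLe a b) (h2 : pairLe b c) : pairLe a c := by
  unfold pairLe at *; omega

theorem pairLe_total (a b : Int × Int) : pairLe a b ∨ pairLe b a := by
  unfold pairLe; omega

theorem heapPush_perm (x : Int × Int) (h : List (Int × Int)) :
    (heapPush x h).Perm (x :: h) := by
  induction h with
  | nil => simp [heapPush]
  | cons y ys ih =>
    unfold heapPush
    split
    · exact List.Perm.refl _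
    · exact (ih.cons y).trans (List.Perm.swap x y ys)

theorem heapPush_pairwise (x : Int × Int) (h : List (Int × Int))
    (hp : h.Pairwise pairLe) : (heapPush x h).Pairwise pairLe := by
  induction h with
  | nil => simp [heapPush]
  | cons y ys ih =>
    unfold heapPush
    split
    · rename_i hxy
      refine List.Pairwise.cons ?_ hp
      intro z hz
      rcases List.mem_cons.mp hz with rfl | hz
      · exact Or.imp id (fun q => ⟨q.1, q.2⟩) hxy
      · exact pairLe_trans (show pairLe x y from hxy) (List.rel_of_pairwise_cons hp hz)
    · rename_i hxy
      have hyx : pairLe y x := (pairLe_total x y).resolve_left hxy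
      refine List.Pairwise.cons ?_ (ih hp.of_cons)
      intro z hz
      rcases List.mem_cons.mp ((heapPush_perm x ys).mem_iff.mp hz) with h | h
      · exact h ▸ hyx
      · exact List.rel_of_pairwise_cons hp h

theorem foldl_heapPush_perm (f : Int → Int × Int) (l : List Int) (h0 : List (Int × Int)) :
    (l.foldl (fun h n => heapPush (f n) h) h0).Perm (h0 ++ l.map f) := by
  induction l generalizing h0 with
  | nil => simp
  | cons a t ih =>
    simp only [List.foldl_cons, List.map_cons]
    refine (ih (heapPush (f a) h0)).trans ?_
    refine (List.Perm.append_right _ ((heapPush_perm (f a) h0))).trans ?_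
    exact (List.perm_middle).symm

theorem foldl_heapPush_pairwise (f : Int → Int × Int) (l : List Int) (h0 : List (Int × Int))
    (hp : h0.Pairwise pairLe) :
    (l.foldl (fun h n => heapPush (f n) h) h0).Pairwise pairLe := by
  induction l generalizing h0 with
  | nil => exact hp
  | cons a t ih => exact ih _ (heapPush_pairwise _ _ hp)

theorem min?_perm (l l' : List Int) (h : l.Perm l') : l.min? = l'.min? := by
  cases hm : l'.min? with
  | none =>
    rw [List.min?_eq_none_iff] at hm
    subst hm
    simp [h.eq_nil]
  | some a =>
    rw [List.min?_eq_some_iff] at hm ⊢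
    exact ⟨h.mem_iff.mpr hm.1, fun b hb => hm.2 b (h.mem_iff.mp hb)⟩

-- popUntil on a heap-ordered list returns the least cost among entries whose node has children
theorem popUntil_eq_min? (g : PySem.Dict Int (List Int)) (h : List (Int × Int))
    (hs : h.Pairwise pairLe) :
    popUntil g h = ((h.filter (fun p => decide (g.getD p.2 [] ≠ []))).map Prod.fst).min? := by
  induction h with
  | nil => rfl
  | cons p rest ih =>
    obtain ⟨c, i⟩ := p
    rw [popUntil]
    by_cases hg : g.getD i [] ≠ []
    · rw [if_pos hg, List.filter_cons_of_pos (by simpa using hg), List.map_cons]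
      symm
      rw [List.min?_eq_some_iff]
      constructor
      · exact List.mem_cons_self
      · intro b hb
        rcases List.mem_cons.mp hb with rfl | hb
        · exact le_refl _
        · obtain ⟨q, hq, rfl⟩ := List.mem_map.mp hb
          have hq' : q ∈ rest := List.mem_of_mem_filter hq
          have := List.rel_of_pairwise_cons hs hq'
          unfold pairLe at this; omega
    · rw [if_neg hg, List.filter_cons_of_neg (by simpa using hg)]
      exact ih hs.of_cons

theorem filterMap_ite_eq {α β : Type} (p : α → Prop) [DecidablePred p] (f : α → β) (l : List α) :
    l.filterMap (fun u => if p u then some (f u) else none)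
      = (l.filter (fun u => decide (p u))).map f := by
  induction l with
  | nil => rfl
  | cons a t ih =>
    rw [List.filterMap_cons, List.filter_cons]
    by_cases h : p a <;> simp [h, ih]

theorem min?_getD_match (l : List Int) :
    l.min?.getD 0 = (match l with | [] => (0 : Int) | c :: cs => cs.foldl min c) := by
  cases l <;> rfl

theorem buildGraph_getD (links : List (Int × Int)) (u : Int) :
    (buildGraph links).getD u [] = (links.filter (fun p => p.1 == u)).map (·.2) := by
  unfold buildGraph
  rw [PySem.Dict.getD_foldl_modify_append]
  simp

-- the cost dict agrees with direct list indexing on keys 1..len(sales) (and is 0 elsewhere)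
theorem buildCost_aux (sales : List Int) (u : Int) (k : Nat) :
    (((PySem.List.pyRange 0 (k : Int) 1).foldl
        (fun d c => d.insert (c + 1) (PySem.List.pyGetD sales c 0)) PySem.Dict.empty).getD u 0)
      = if 1 ≤ u ∧ u ≤ (k : Int) then PySem.List.pyGetD sales (u - 1) 0 else 0 := by
  induction k with
  | zero =>
    rw [show (((0 : Nat) : Int)) = 0 from rfl, PySem.List.pyRange_one_eq_nil le_rfl]
    simp only [List.foldl_nil]
    rw [if_neg (by omega), PySem.Dict.getD_empty]
  | succ k ih =>
    have hk : (0 : Int) ≤ (k : Int) := by positivity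
    have : PySem.List.pyRange 0 ((k : Int) + 1) 1
        = PySem.List.pyRange 0 (k : Int) 1 ++ [(k : Int)] :=
      PySem.List.pyRange_one_succ_right hk
    push_cast
    rw [this, List.foldl_append]
    simp only [List.foldl_cons, List.foldl_nil]
    rw [PySem.Dict.getD_insert]
    by_cases hu : u = (k : Int) + 1
    · rw [if_pos hu, if_pos (by omega), hu]
      norm_num
    · rw [if_neg hu, ih]
      by_cases h1 : 1 ≤ u ∧ u ≤ (k : Int)
      · rw [if_pos h1, if_pos ⟨h1.1, by omega⟩]
      · rw [if_neg h1, if_neg (by omega)]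

theorem buildCost_getD (sales : List Int) (u : Int) (h1 : 1 ≤ u) (h2 : u ≤ (sales.length : Int)) :
    (buildCost sales).getD u 0 = PySem.List.pyGetD sales (u - 1) 0 := by
  unfold buildCost
  rw [buildCost_aux sales u sales.length, if_pos ⟨h1, h2⟩]

-- membership characterization of one closure round
theorem mem_reachStep (links : List (Int × Int)) (R : List Int) (x : Int) :
    x ∈ reachStep links R ↔ x ∈ R ∨ ∃ p ∈ links, p.1 ∈ R ∧ p.2 = x := by
  unfold reachStep
  simp only [List.mem_dedup, List.mem_append, List.mem_flatMap, List.mem_map,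
    List.mem_filter]
  constructor
  · rintro (h | ⟨v, hv, p, ⟨hpl, hph⟩, rfl⟩)
    · exact Or.inl h
    · refine Or.inr ⟨p, hpl, ?_, rfl⟩
      have hpv : p.1 = v := by simpa using hph
      rw [hpv]; exact hv
  · rintro (h | ⟨p, hpl, hph, rfl⟩)
    · exact Or.inl h
    · exact Or.inr ⟨p.1, hph, p, ⟨hpl, by simp⟩, rfl⟩

theorem subset_reachStep (links : List (Int × Int)) (R : List Int) (x : Int) (h : x ∈ R) :
    x ∈ reachStep links R :=
  (mem_reachStep links R x).mpr (Or.inl h)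

theorem reachStep_mem_ext (links : List (Int × Int)) (R R' : List Int)
    (h : ∀ x, x ∈ R ↔ x ∈ R') (x : Int) :
    x ∈ reachStep links R ↔ x ∈ reachStep links R' := by
  rw [mem_reachStep, mem_reachStep]
  simp only [h]

-- shorthand for the closure iterates
def reachIter (links : List (Int × Int)) (k : Nat) : List Int :=
  (fun R => reachStep links R)^[k] [1]

theorem reachIter_succ (links : List (Int × Int)) (k : Nat) :
    reachIter links (k + 1) = reachStep links (reachIter links k) := by
  unfold reachIter
  rw [Function.iterate_succ_apply']

theorem reachIter_mono (links : List (Int × Int)) (k : Nat) (x : Int)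
    (h : x ∈ reachIter links k) : x ∈ reachIter links (k + 1) := by
  rw [reachIter_succ]
  exact subset_reachStep _ _ _ h

theorem one_mem_reachIter (links : List (Int × Int)) (k : Nat) : (1 : Int) ∈ reachIter links k := by
  induction k with
  | zero => simp [reachIter]
  | succ k ih => exact reachIter_mono links k 1 ih

theorem reachIter_subset_univ (links : List (Int × Int)) (k : Nat) (x : Int)
    (h : x ∈ reachIter links k) : x ∈ (1 : Int) :: links.map Prod.snd := by
  induction k generalizing x with
  | zero =>
    simp [reachIter] at h
    simp [h]
  | succ k ih =>
    rw [reachIter_succ, mem_reachStep] at h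
    rcases h with h | ⟨p, hpl, -, rfl⟩
    · exact ih x h
    · exact List.mem_cons_of_mem _ (List.mem_map_of_mem hpl)

theorem reachIter_stable_propagates (links : List (Int × Int)) (k : Nat)
    (h : ∀ x, x ∈ reachIter links (k + 1) ↔ x ∈ reachIter links k) :
    ∀ m x, x ∈ reachIter links (k + m) ↔ x ∈ reachIter links k := by
  intro m
  induction m with
  | zero => intro x; rfl
  | succ m ih =>
    intro x
    have : k + (m + 1) = (k + m) + 1 := by omega
    rw [this, reachIter_succ]
    rw [reachStep_mem_ext links _ _ ih x, ← reachIter_succ]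
    exact h x

-- after links.length rounds the closure is a fixpoint
theorem reachSet_stable (links : List (Int × Int)) (x : Int) :
    x ∈ reachIter links (links.length + 1) ↔ x ∈ reachSet links := by
  have hset : reachSet links = reachIter links links.length := rfl
  rw [hset]
  by_cases hstab : ∃ k < links.length, ∀ y, y ∈ reachIter links (k + 1) ↔ y ∈ reachIter links k
  · obtain ⟨k, hk, hst⟩ := hstab
    have hall := reachIter_stable_propagates links k hst
    have h1 : x ∈ reachIter links (links.length + 1) ↔ x ∈ reachIter links k := by
      have : links.length + 1 = k + (links.length + 1 - k) := by omega
      rw [this]; exact hall _ x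
    have h2 : x ∈ reachIter links links.length ↔ x ∈ reachIter links k := by
      have : links.length = k + (links.length - k) := by omega
      rw [this]; exact hall _ x
    rw [h1, h2]
  · push Not at hstab
    -- every round before links.length adds a node, so the iterate exhausts the universe
    have hgrow : ∀ k ≤ links.length, k + 1 ≤ (reachIter links k).toFinset.card := by
      intro k
      induction k with
      | zero => intro _; simp [reachIter]
      | succ k ih =>
        intro hk
        have hlt : k < links.length := by omega
        obtain ⟨y, hy⟩ := hstab k hlt
        have hy1 : y ∈ reachIter links (k + 1) ∧ y ∉ reachIter links k := by
          rcases hy with h | h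
          · exact h
          · exact absurd (reachIter_mono links k y h.2) h.1
        have hsub : (reachIter links k).toFinset ⊂ (reachIter links (k + 1)).toFinset := by
          constructor
          · intro z hz
            rw [List.mem_toFinset] at hz ⊢
            exact reachIter_mono links k z hz
          · intro hcon
            have := hcon (List.mem_toFinset.mpr hy1.1)
            exact hy1.2 (List.mem_toFinset.mp this)
        have := Finset.card_lt_card hsub
        have := ih (by omega)
        omega
    have hcard := hgrow links.length le_rfl
    have huniv : ∀ z ∈ reachIter links links.length, z ∈ ((1 : Int) :: links.map Prod.snd) :=
      fun z hz => reachIter_subset_univ links links.length z hz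
    have hsubU : (reachIter links links.length).toFinset ⊆
        ((1 : Int) :: links.map Prod.snd).toFinset := by
      intro z hz
      rw [List.mem_toFinset] at hz ⊢
      exact huniv z hz
    have hUcard : (((1 : Int) :: links.map Prod.snd).toFinset).card ≤ links.length + 1 := by
      calc (((1 : Int) :: links.map Prod.snd).toFinset).card
          ≤ ((1 : Int) :: links.map Prod.snd).length := List.toFinset_card_le _
        _ = links.length + 1 := by simp
    have heq : (reachIter links links.length).toFinset =
        ((1 : Int) :: links.map Prod.snd).toFinset :=
      Finset.eq_of_subset_of_card_le hsubU (by omega)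
    constructor
    · intro hx
      have : x ∈ ((1 : Int) :: links.map Prod.snd) :=
        reachIter_subset_univ links (links.length + 1) x hx
      have : x ∈ (reachIter links links.length).toFinset := by
        rw [heq]; exact List.mem_toFinset.mpr this
      exact List.mem_toFinset.mp this
    · exact reachIter_mono links links.length x

-- the reach set is closed under taking children
theorem reach_closed (links : List (Int × Int)) (x : Int) (hx : x ∈ reachSet links)
    (p : Int × Int) (hp : p ∈ links) (hph : p.1 = x) : p.2 ∈ reachSet links := by
  rw [← reachSet_stable]
  have : reachSet links = reachIter links links.length := rfl
  rw [reachIter_succ, mem_reachStep]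
  exact Or.inr ⟨p, hp, by rw [hph]; exact (this ▸ hx), rfl⟩

theorem one_mem_reachSet (links : List (Int × Int)) : (1 : Int) ∈ reachSet links :=
  one_mem_reachIter links links.length

theorem passing_in_range (sales : List Int) (links : List (Int × Int))
    (hpre : Pre_solution sales links) (u : Int) (hur : u ∈ reachSet links)
    (hu : (buildGraph links).getD u [] ≠ []) :
    1 ≤ u ∧ u ≤ (sales.length : Int) := by
  rw [buildGraph_getD] at hu
  rcases List.exists_mem_of_ne_nil _ hu with ⟨w, hw⟩
  obtain ⟨q, hq, -⟩ := List.mem_map.mp hw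
  have hq2 := List.mem_filter.mp hq
  have hq1 : q.1 = u := by simpa using hq2.2
  obtain ⟨a1, a2, -⟩ := hpre.1 q hq2.1 (by rw [hq1]; exact hur)
  omega

-- children of a reachable node are reachable
theorem children_reach (links : List (Int × Int)) (v : Int) (hv : v ∈ reachSet links)
    (u : Int) (hu : u ∈ (buildGraph links).getD v []) : u ∈ reachSet links := by
  rw [buildGraph_getD] at hu
  obtain ⟨p, hp, rfl⟩ := List.mem_map.mp hu
  have hp2 := List.mem_filter.mp hp
  exact reach_closed links v hv p hp2.1 (by simpa using hp2.2)

-- A's heap step computes exactly B's per-node contribution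
theorem step_eq (sales : List Int) (links : List (Int × Int))
    (hpre : Pre_solution sales links) (v : Int) (hvr : v ∈ reachSet links) :
    (popUntil (buildGraph links)
        (((buildGraph links).getD v []).foldl
          (fun h n => heapPush ((buildCost sales).getD n 0, n) h)
          (heapPush ((buildCost sales).getD v 0, v) []))).getD 0
      = contribB sales (buildGraph links) v := by
  set g := buildGraph links with hg
  set cost := buildCost sales with hc
  set ch := g.getD v [] with hch
  have hpw : (ch.foldl (fun h n => heapPush ((cost.getD n 0), n) h)
      (heapPush (cost.getD v 0, v) [])).Pairwise pairLe :=
    foldl_heapPush_pairwise _ _ _ (heapPush_pairwise _ _ (List.Pairwise.nil))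
  have hperm : (ch.foldl (fun h n => heapPush ((cost.getD n 0), n) h)
      (heapPush (cost.getD v 0, v) [])).Perm
      ((v :: ch).map (fun u => (cost.getD u 0, u))) := by
    refine (foldl_heapPush_perm (fun n => (cost.getD n 0, n)) ch _).trans ?_
    simp [heapPush]
  rw [popUntil_eq_min? _ _ hpw]
  have hP : ∀ (l : List (Int × Int)) (l' : List (Int × Int)), l.Perm l' →
      ((l.filter (fun p => decide (g.getD p.2 [] ≠ []))).map Prod.fst).min?
        = ((l'.filter (fun p => decide (g.getD p.2 [] ≠ []))).map Prod.fst).min? :=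
    fun l l' hp => min?_perm _ _ ((hp.filter _).map _)
  rw [hP _ _ hperm]
  -- push filter/map through the map over candidates
  rw [List.filter_map, List.map_map]
  -- align A's dict cost with B's list indexing on passing candidates
  have hcong : ((v :: ch).filter
        ((fun p => decide (g.getD p.2 [] ≠ [])) ∘ fun u => (cost.getD u 0, u))).map
        (Prod.fst ∘ fun u => (cost.getD u 0, u))
      = ((v :: ch).filter (fun u => decide (g.getD u [] ≠ []))).map
        (fun u => PySem.List.pyGetD sales (u - 1) 0) := by
    rw [show ((fun p => decide (g.getD p.2 [] ≠ [])) ∘ fun u => ((cost.getD u 0), u))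
        = (fun u => decide (g.getD u [] ≠ [])) from rfl]
    refine List.map_congr_left ?_
    intro u hu
    have hu2 := (List.mem_filter.mp hu).2
    have hne : g.getD u [] ≠ [] := by simpa using hu2
    have hurch : u ∈ reachSet links := by
      rcases List.mem_cons.mp (List.mem_filter.mp hu).1 with rfl | huch
      · exact hvr
      · exact children_reach links v hvr u (hch ▸ huch)
    obtain ⟨b1, b2⟩ := passing_in_range sales links hpre u hurch hne
    simp only [Function.comp_apply]
    exact buildCost_getD sales u b1 b2
  rw [hcong]
  rw [min?_getD_match]
  unfold contribB
  rw [filterMap_ite_eq (fun u => g.getD u [] ≠ [])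
    (fun u => PySem.List.pyGetD sales (u - 1) 0)]
  simp only [List.singleton_append]
  rw [← hch]

-- the fused loop of A equals B's two-phase traversal-then-sum, for any fuel and queue
theorem loop_eq (sales : List Int) (links : List (Int × Int))
    (hpre : Pre_solution sales links) :
    ∀ (fuel : Nat) (q : List Int) (result : Int), (∀ x ∈ q, x ∈ reachSet links) →
      aLoop (buildGraph links) (buildCost sales) fuel q result
        = result + ((bfsOrder (buildGraph links) fuel q).map
            (contribB sales (buildGraph links))).sum := by
  intro fuel
  induction fuel with
  | zero => intro q result _; simp [aLoop, bfsOrder]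
  | succ fuel ih =>
    intro q result hq
    cases q with
    | nil => simp [aLoop, bfsOrder]
    | cons v t =>
      have hv : v ∈ reachSet links := hq v List.mem_cons_self
      have hq' : ∀ x ∈ t ++ (buildGraph links).getD v [], x ∈ reachSet links := by
        intro x hx
        rcases List.mem_append.mp hx with hx | hx
        · exact hq x (List.mem_cons_of_mem _ hx)
        · exact children_reach links v hv x hx
      rw [aLoop, bfsOrder]
      simp only [List.map_cons, List.sum_cons]
      have hstep := step_eq sales links hpre v hv
      cases hpop : popUntil (buildGraph links)
          ((((buildGraph links).getD v [])).foldl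
            (fun h n => heapPush ((buildCost sales).getD n 0, n) h)
            (heapPush ((buildCost sales).getD v 0, v) [])) with
      | none =>
        rw [hpop] at hstep
        simp only [Option.getD_none] at hstep
        rw [← hstep]
        exact (ih _ _ hq').trans (by ring)
      | some c =>
        rw [hpop] at hstep
        simp only [Option.getD_some] at hstep
        rw [hstep]
        exact (ih _ _ hq').trans (by ring)

-- ===== VERDICT (by name: the statement is the Claim_ definition above) =====
theorem solution_spec : Claim_equal_solution := by
  intro sales links _hdom hpre
  unfold Spec_solution solution solution_alt
  rw [loop_eq sales links hpre _ _ _ (by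
    intro x hx
    rcases List.mem_singleton.mp hx with rfl
    exact one_mem_reachSet links)]
  simp
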